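-- pv_equiv track=rewrite | github.com/ChangxingJiang/OJ-Practice | A5-周赛未解决/1632_Python_1.py | matrixRankTransform
-- ===== SOURCE A (Python) =====
-- from typing import List
--
-- def matrixRankTransform(matrix: List[List[int]]) -> List[List[int]]:
--     # 计算矩阵的行数(n)和列数(m)
--     n, m = len(matrix), len(matrix[0])
--
--     # 计算总数
--     total = n * m
--
--     # 各行各列中的值的排序列表
--     row_vals = [list(sorted(row, reverse=True)) for row in matrix]
--     col_vals = [list(sorted([matrix[i][j] for i in range(n)], reverse=True)) for j in range(m)]
--
--     # 当前秩的最大值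
--     rank_now = 1
--
--     # 当前已填写数
--     finish = 0
--     ans = [[0] * m for _ in range(n)]
--
--     # 不断遍历生成新的秩
--     while finish < total:
--
--         row_rank = [row_vals[i][-1] if row_vals[i] else None for i in range(n)]  # 当前行的秩对应的最小值
--         col_rank = [col_vals[j][-1] if col_vals[j] else None for j in range(m)]  # 当前列的秩对应的最小值
--
--         # 遍历处理各行
--         for i in range(n):
--
--             right = True
--             position = []
--
--             for j in range(m):
--                 if ans[i][j] == 0:  # 判断当前位置是否已有秩
--                     val = matrix[i][j]
--
--                     # 判断当前位置是否为当前情况下的行列最小值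
--                     if val == row_rank[i]:
--                         if val == col_rank[j]:
--                             position.append(j)
--                         else:
--                             right = False
--
--             if right:
--                 for j in position:
--                     ans[i][j] = rank_now  # 填写当前位置的秩
--
--                     row_vals[i].pop()  # 移除当前行排序列表中的值
--                     col_vals[j].pop()  # 移除当前列排序列表中的值
--
--                     finish += 1  # 统计秩的填写数量
--
--         # 遍历处理各列
--         for j in range(m):
--
--             right = True
--             position = []
--
--             for i in range(n):
--                 if ans[i][j] == 0:  # 判断当前位置是否已有秩
--                     val = matrix[i][j]
--
--                     # 判断当前位置是否为当前情况下的行列最小值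
--                     if val == col_rank[j]:
--                         if val == row_rank[i]:
--                             position.append(i)
--                         else:
--                             right = False
--
--             if right:
--                 for i in position:
--                     ans[i][j] = rank_now  # 填写当前位置的秩
--
--                     row_vals[i].pop()  # 移除当前行排序列表中的值
--                     col_vals[j].pop()  # 移除当前列排序列表中的值
--
--                     finish += 1  # 统计秩的填写数量
--
--         rank_now += 1
--
--     return ans
-- ===== SOURCE B (Python) =====
-- from typing import List
--
-- def matrixRankTransform(matrix: List[List[int]]) -> List[List[int]]:
--     # Simpler state: keep only the answer grid; recompute per-round row/column
--     # minima over still-unranked cells instead of maintaining sorted lists with pops.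
--     n, m = len(matrix), len(matrix[0])
--     ans = [[0] * m for _ in range(n)]
--     rank = 1
--     while any(ans[i][j] == 0 for i in range(n) for j in range(m)):
--         row_min = [min((matrix[i][j] for j in range(m) if ans[i][j] == 0), default=None)
--                    for i in range(n)]
--         col_min = [min((matrix[i][j] for i in range(n) if ans[i][j] == 0), default=None)
--                    for j in range(m)]
--         for i in range(n):
--             cells = [j for j in range(m) if ans[i][j] == 0 and matrix[i][j] == row_min[i]]
--             if all(matrix[i][j] == col_min[j] for j in cells):
--                 for j in cells:
--                     ans[i][j] = rank
--         for j in range(m):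
--             cells = [i for i in range(n) if ans[i][j] == 0 and matrix[i][j] == col_min[j]]
--             if all(matrix[i][j] == row_min[i] for i in cells):
--                 for i in cells:
--                     ans[i][j] = rank
--         rank += 1
--     return ans
-- ===== Notes on version B (the rewrite author's own statement) =====
-- stated objective: simpler
-- what changed: B keeps only the answer grid and recomputes each round's row/column minima over still-unranked cells with comprehensions and all(), replacing A's maintained reverse-sorted per-row/per-column value lists with pop() bookkeeping and flag loops; Pre_ excludes non-rectangular matrices, on which A raises IndexError (a shorter row) or can loop forever (a longer row; where A does return there, B happens to agree anyway).
-- outside the precondition, e.g. on matrixRankTransform([[0], [1, 2]]): A returns [[1], [2]], B returns [[1], [2]]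
import Mathlib
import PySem

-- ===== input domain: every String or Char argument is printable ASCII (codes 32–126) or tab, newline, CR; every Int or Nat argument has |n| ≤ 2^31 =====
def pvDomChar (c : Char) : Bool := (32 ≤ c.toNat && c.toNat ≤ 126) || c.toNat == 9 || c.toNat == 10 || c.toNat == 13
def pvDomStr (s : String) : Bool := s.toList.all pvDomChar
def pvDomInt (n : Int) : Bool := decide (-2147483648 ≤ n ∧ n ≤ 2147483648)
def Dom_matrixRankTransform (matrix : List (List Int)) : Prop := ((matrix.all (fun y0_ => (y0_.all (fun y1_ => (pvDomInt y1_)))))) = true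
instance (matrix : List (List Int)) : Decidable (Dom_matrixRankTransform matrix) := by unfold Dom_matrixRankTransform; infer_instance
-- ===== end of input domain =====

-- B keeps only the answer grid and recomputes per-round row/column minima over still-unranked
-- cells, replacing A's maintained reverse-sorted value lists with pop() bookkeeping (objective: simpler).


-- shared index helpers (in-range 2-D read / write; indices produced by range loops are in range)
def pvGet2 (xs : List (List Int)) (i j : Nat) : Int := (xs.getD i []).getD j 0
def pvSet2 (xs : List (List Int)) (i j : Nat) (v : Int) : List (List Int) :=
  xs.set i ((xs.getD i []).set j v)

-- ===== PORT A =====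
-- mutable state of A's while loop: (ans, row_vals, col_vals, finish)
structure PvStA where
  ans : List (List Int)
  rowVals : List (List Int)
  colVals : List (List Int)
  finish : Nat
deriving Repr, DecidableEq

-- one fill at (i, j): ans[i][j] = rank; row_vals[i].pop(); col_vals[j].pop(); finish += 1
-- (the popped lists are nonempty whenever Python reaches a pop, so .pop() is .dropLast)
def pvFillA (rank : Int) (i j : Nat) (s : PvStA) : PvStA :=
  { ans := pvSet2 s.ans i j rank,
    rowVals := s.rowVals.set i ((s.rowVals.getD i []).dropLast),
    colVals := s.colVals.set j ((s.colVals.getD j []).dropLast),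
    finish := s.finish + 1 }

-- the '遍历处理各行' body for one row i (right flag + position list, then the fills)
def pvRowPassA (matrix : List (List Int)) (m : Nat) (rank : Int)
    (rowRank colRank : List (Option Int)) (s : PvStA) (i : Nat) : PvStA :=
  let rp := (List.range m).foldl (fun (rp : Bool × List Nat) j =>
      if pvGet2 s.ans i j = 0 then
        if some (pvGet2 matrix i j) = rowRank.getD i none then
          if some (pvGet2 matrix i j) = colRank.getD j none then (rp.1, rp.2 ++ [j])
          else (false, rp.2)
        else rp
      else rp) (true, [])
  if rp.1 then rp.2.foldl (fun s j => pvFillA rank i j s) s else s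

-- the '遍历处理各列' body for one column j
def pvColPassA (matrix : List (List Int)) (n : Nat) (rank : Int)
    (rowRank colRank : List (Option Int)) (s : PvStA) (j : Nat) : PvStA :=
  let rp := (List.range n).foldl (fun (rp : Bool × List Nat) i =>
      if pvGet2 s.ans i j = 0 then
        if some (pvGet2 matrix i j) = colRank.getD j none then
          if some (pvGet2 matrix i j) = rowRank.getD i none then (rp.1, rp.2 ++ [i])
          else (false, rp.2)
        else rp
      else rp) (true, [])
  if rp.1 then rp.2.foldl (fun s i => pvFillA rank i j s) s else s

-- while finish < total: …  (fuel = total + 1; Python performs at most `total` iterations,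
-- since every iteration ranks at least the cells holding the smallest still-unranked value)
def pvLoopA (matrix : List (List Int)) (n m total : Nat) : Nat → PvStA → Int → List (List Int)
  | 0, s, _ => s.ans
  | f + 1, s, rank =>
    if s.finish < total then
      let rowRank := (List.range n).map (fun i => (s.rowVals.getD i []).getLast?)
      let colRank := (List.range m).map (fun j => (s.colVals.getD j []).getLast?)
      let s1 := (List.range n).foldl (pvRowPassA matrix m rank rowRank colRank) s
      let s2 := (List.range m).foldl (pvColPassA matrix n rank rowRank colRank) s1
      pvLoopA matrix n m total f s2 (rank + 1)
    else s.ans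

def matrixRankTransform (matrix : List (List Int)) : List (List Int) :=
  let n := matrix.length
  let m := (matrix.headD []).length   -- matrix[0]: Pre_ requires matrix ≠ []
  let total := n * m
  let rowVals := matrix.map (fun row => PySem.List.sorted row (fun x => x) true)
  let colVals := (List.range m).map (fun j =>
      PySem.List.sorted ((List.range n).map (fun i => pvGet2 matrix i j)) (fun x => x) true)
  let ans := List.replicate n (List.replicate m (0 : Int))
  pvLoopA matrix n m total (total + 1) ⟨ans, rowVals, colVals, 0⟩ 1

-- ===== PORT B =====
-- values of the still-unranked cells of row i / column j
def pvUnRow (matrix ans : List (List Int)) (m i : Nat) : List Int :=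
  ((List.range m).filter (fun j => pvGet2 ans i j = 0)).map (fun j => pvGet2 matrix i j)

def pvUnCol (matrix ans : List (List Int)) (n j : Nat) : List Int :=
  ((List.range n).filter (fun i => pvGet2 ans i j = 0)).map (fun i => pvGet2 matrix i j)

-- row step: rank every minimal unranked cell of row i if each is also a column minimum
def pvRowStepB (matrix : List (List Int)) (m : Nat) (rank : Int)
    (rowMin colMin : List (Option Int)) (ans : List (List Int)) (i : Nat) : List (List Int) :=
  let cells := (List.range m).filter (fun j =>
      pvGet2 ans i j = 0 ∧ some (pvGet2 matrix i j) = rowMin.getD i none)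
  if cells.all (fun j => some (pvGet2 matrix i j) = colMin.getD j none) then
    cells.foldl (fun ans j => pvSet2 ans i j rank) ans
  else ans

-- column step, symmetric
def pvColStepB (matrix : List (List Int)) (n : Nat) (rank : Int)
    (rowMin colMin : List (Option Int)) (ans : List (List Int)) (j : Nat) : List (List Int) :=
  let cells := (List.range n).filter (fun i =>
      pvGet2 ans i j = 0 ∧ some (pvGet2 matrix i j) = colMin.getD j none)
  if cells.all (fun i => some (pvGet2 matrix i j) = rowMin.getD i none) then
    cells.foldl (fun ans i => pvSet2 ans i j rank) ans
  else ans

-- while any cell is unranked: …  (same fuel bound as A's loop)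
def pvLoopB (matrix : List (List Int)) (n m : Nat) : Nat → List (List Int) → Int → List (List Int)
  | 0, ans, _ => ans
  | f + 1, ans, rank =>
    if (List.range n).any (fun i => (List.range m).any (fun j => pvGet2 ans i j = 0)) then
      let rowMin := (List.range n).map (fun i => PySem.List.min? (pvUnRow matrix ans m i) (fun x => x))
      let colMin := (List.range m).map (fun j => PySem.List.min? (pvUnCol matrix ans n j) (fun x => x))
      let ans1 := (List.range n).foldl (pvRowStepB matrix m rank rowMin colMin) ans
      let ans2 := (List.range m).foldl (pvColStepB matrix n rank rowMin colMin) ans1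
      pvLoopB matrix n m f ans2 (rank + 1)
    else ans

def matrixRankTransform_alt (matrix : List (List Int)) : List (List Int) :=
  let n := matrix.length
  let m := (matrix.headD []).length
  let ans := List.replicate n (List.replicate m (0 : Int))
  pvLoopB matrix n m (n * m + 1) ans 1

-- ===== PRECONDITION & SPEC =====
-- Pre_ excludes non-rectangular input: with a row shorter than the first, A raises IndexError;
-- with a row longer than the first, A can loop forever (extra values pollute its per-row sorted
-- lists), and on those ragged inputs where A does happen to return, B returns the same grid anyway.
def Pre_matrixRankTransform (matrix : List (List Int)) : Prop :=
  matrix ≠ [] ∧ ∀ row ∈ matrix, row.length = (matrix.headD []).length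
instance (matrix : List (List Int)) : Decidable (Pre_matrixRankTransform matrix) := by
  unfold Pre_matrixRankTransform; infer_instance

def pvWitness_matrixRankTransform : List (List Int) := [[1, 2], [3, 4]]

def Spec_matrixRankTransform (matrix : List (List Int)) (out : List (List Int)) : Prop := out = matrixRankTransform_alt matrix
instance (matrix : List (List Int)) (out : List (List Int)) : Decidable (Spec_matrixRankTransform matrix out) := by unfold Spec_matrixRankTransform; infer_instance

-- ===== CLAIM (what is proved, stated in full; the proofs are below) =====
def Claim_equal_matrixRankTransform : Prop := ∀ (matrix : List (List Int)), Dom_matrixRankTransform matrix → Pre_matrixRankTransform matrix → Spec_matrixRankTransform matrix (matrixRankTransform matrix)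

-- ===== LEMMAS AND PROOFS =====

theorem pv_set2_of_ge {xs : List (List Int)} {i : Nat} (j : Nat) (v : Int)
    (h : xs.length ≤ i) : pvSet2 xs i j v = xs := by
  unfold pvSet2; exact List.set_eq_of_length_le h

theorem pv_get2_set2_self {xs : List (List Int)} {i j : Nat} (v : Int)
    (hi : i < xs.length) (hj : j < (xs.getD i []).length) :
    pvGet2 (pvSet2 xs i j v) i j = v := by
  unfold pvGet2 pvSet2
  simp only [List.getD_eq_getElem?_getD]
  rw [List.getElem?_set_self (by simpa using hi)]
  simp only [Option.getD_some]
  rw [List.getElem?_set_self (by simpa [List.getD_eq_getElem?_getD] using hj)]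
  rfl

theorem pv_get2_set2_ne {xs : List (List Int)} {i j : Nat} (v : Int) {i' j' : Nat}
    (h : i' ≠ i ∨ j' ≠ j) :
    pvGet2 (pvSet2 xs i j v) i' j' = pvGet2 xs i' j' := by
  unfold pvGet2 pvSet2
  simp only [List.getD_eq_getElem?_getD]
  rcases h with h | h
  · rw [List.getElem?_set_ne (by omega)]
  · by_cases hii : i' = i
    · subst hii
      by_cases hlen : i' < xs.length
      · rw [List.getElem?_set_self (by simpa using hlen)]
        simp only [Option.getD_some]
        rw [List.getElem?_set_ne (by omega)]
      · rw [List.set_eq_of_length_le (by omega)]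
    · rw [List.getElem?_set_ne (by omega)]

theorem pv_length_set2 (xs : List (List Int)) (i j : Nat) (v : Int) :
    (pvSet2 xs i j v).length = xs.length := by
  unfold pvSet2; simp

theorem pv_rowlen_set2 {xs : List (List Int)} {m : Nat} (i j : Nat) (v : Int)
    (h : ∀ r ∈ xs, r.length = m) : ∀ r ∈ pvSet2 xs i j v, r.length = m := by
  by_cases hlen : i < xs.length
  · intro r hr
    rcases List.mem_or_eq_of_mem_set hr with h' | h'
    · exact h r h'
    · subst h'
      rw [List.length_set]
      exact h _ (by rw [List.getD_eq_getElem (l := xs) (hn := hlen)]; exact List.getElem_mem hlen)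
  · rw [pv_set2_of_ge j v (by omega)]; exact h

theorem pv_foldl_min {a : Int} : ∀ (t : List Int) (x : Int),
    a ∈ x :: t → (∀ z ∈ x :: t, a ≤ z) → t.foldl min x = a := by
  intro t
  induction t with
  | nil =>
    intro x ha hlb
    simp only [List.foldl_nil]
    have := hlb x (by simp)
    simp at ha; omega
  | cons y t ih =>
    intro x ha hlb
    simp only [List.foldl_cons]
    apply ih
    · have h1 := hlb x (by simp)
      have h2 := hlb y (by simp)
      simp only [List.mem_cons] at ha ⊢
      rcases ha with rfl | rfl | h
      · left; omega
      · left; omega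
      · right; exact h
    · intro z hz
      rcases List.mem_cons.mp hz with rfl | hz
      · have h1 := hlb x (by simp)
        have h2 := hlb y (by simp)
        simp only [le_min_iff]; omega
      · exact hlb z (by simp [hz])

-- min(u) = a for a member a that is a lower bound

theorem pv_min_some {u : List Int} {a : Int} (ha : a ∈ u) (hlb : ∀ x ∈ u, a ≤ x) :
    PySem.List.min? u (fun x => x) = some a := by
  cases u with
  | nil => cases ha
  | cons x t =>
    rw [PySem.List.min?_id_cons]
    exact congrArg some (pv_foldl_min t x ha hlb)

-- the last element of a descending list is a lower bound

theorem pv_getLast_lb : ∀ (l : List Int), l.Pairwise (fun a b => b ≤ a) →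
    ∀ g, l.getLast? = some g → ∀ z ∈ l, g ≤ z := by
  intro l
  induction l with
  | nil => intro _ g hg; cases hg
  | cons x t ih =>
    intro hp g hg z hz
    have hx : ∀ y ∈ t, y ≤ x := (List.pairwise_cons.mp hp).1
    have hpt : t.Pairwise (fun a b => b ≤ a) := (List.pairwise_cons.mp hp).2
    cases t with
    | nil =>
      simp only [List.getLast?_singleton, Option.some.injEq] at hg
      simp only [List.mem_singleton] at hz
      omega
    | cons y s =>
      have hg' : (y :: s).getLast? = some g := by
        rw [← hg]; rw [List.getLast?_cons_cons]
      rcases List.mem_cons.mp hz with rfl | hz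
      · have hgm : g ∈ y :: s := List.mem_of_getLast? hg'
        have := hx g hgm
        omega
      · exact ih hpt g hg' z hz

-- row_vals[i][-1] (last of a descending list) is min() of any rearrangement

theorem pv_getLast_eq_min {l u : List Int} (hp : l.Pairwise (fun a b => b ≤ a))
    (hperm : l.Perm u) : l.getLast? = PySem.List.min? u (fun x => x) := by
  cases hl : l with
  | nil => subst hl; rw [List.nil_perm.mp hperm]; rfl
  | cons x t =>
    subst hl
    have hne : (x :: t : List Int) ≠ [] := by simp
    obtain ⟨g, hg⟩ : ∃ g, (x :: t).getLast? = some g := by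
      cases h : (x :: t).getLast? with
      | none => rw [List.getLast?_eq_none_iff] at h; cases h
      | some g => exact ⟨g, rfl⟩
    rw [hg]
    symm
    apply pv_min_some
    · exact hperm.mem_iff.mp (List.mem_of_getLast? hg)
    · intro z hz
      exact pv_getLast_lb _ hp g hg z (hperm.mem_iff.mpr hz)

-- ranking cell (i,j) removes index j from row i's unranked-index list (up to order)

theorem pv_idx_perm_row {ans : List (List Int)} {m i j : Nat} {v : Int}
    (hj : j < m) (h0 : pvGet2 ans i j = 0) (hv : v ≠ 0)
    (hi : i < ans.length) (hjr : j < (ans.getD i []).length) :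
    ((List.range m).filter (fun j' => pvGet2 ans i j' = 0)).Perm
      (j :: (List.range m).filter (fun j' => pvGet2 (pvSet2 ans i j v) i j' = 0)) := by
  have hnd : ((List.range m).filter (fun j' => pvGet2 ans i j' = 0)).Nodup :=
    List.Nodup.filter _ List.nodup_range
  have hjm : j ∈ (List.range m).filter (fun j' => pvGet2 ans i j' = 0) := by
    simp [List.mem_filter, List.mem_range, hj, h0]
  have h1 := List.perm_cons_erase hjm
  have h2 : ((List.range m).filter (fun j' => pvGet2 ans i j' = 0)).erase j
      = (List.range m).filter (fun j' => pvGet2 (pvSet2 ans i j v) i j' = 0) := by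
    rw [List.Nodup.erase_eq_filter hnd, List.filter_filter]
    apply List.filter_congr
    intro k hk
    by_cases hkj : k = j
    · subst hkj
      simp [pv_get2_set2_self v hi hjr, hv]
    · simp [pv_get2_set2_ne v (Or.inr hkj), hkj]
  rw [h2] at h1
  exact h1

theorem pv_idx_perm_col {ans : List (List Int)} {n i j : Nat} {v : Int}
    (hi : i < n) (h0 : pvGet2 ans i j = 0) (hv : v ≠ 0)
    (hil : i < ans.length) (hjr : j < (ans.getD i []).length) :
    ((List.range n).filter (fun i' => pvGet2 ans i' j = 0)).Perm
      (i :: (List.range n).filter (fun i' => pvGet2 (pvSet2 ans i j v) i' j = 0)) := by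
  have hnd : ((List.range n).filter (fun i' => pvGet2 ans i' j = 0)).Nodup :=
    List.Nodup.filter _ List.nodup_range
  have him : i ∈ (List.range n).filter (fun i' => pvGet2 ans i' j = 0) := by
    simp [List.mem_filter, List.mem_range, hi, h0]
  have h1 := List.perm_cons_erase him
  have h2 : ((List.range n).filter (fun i' => pvGet2 ans i' j = 0)).erase i
      = (List.range n).filter (fun i' => pvGet2 (pvSet2 ans i j v) i' j = 0) := by
    rw [List.Nodup.erase_eq_filter hnd, List.filter_filter]
    apply List.filter_congr
    intro k hk
    by_cases hki : k = i
    · subst hki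
      simp [pv_get2_set2_self v hil hjr, hv]
    · simp [pv_get2_set2_ne v (Or.inl hki), hki]
  rw [h2] at h1
  exact h1

-- other rows / other columns are untouched

theorem pv_idx_eq_row {ans : List (List Int)} {m i j : Nat} {v : Int} {i' : Nat} (h : i' ≠ i) :
    (List.range m).filter (fun j' => pvGet2 (pvSet2 ans i j v) i' j' = 0)
      = (List.range m).filter (fun j' => pvGet2 ans i' j' = 0) := by
  apply List.filter_congr
  intro k _
  simp [pv_get2_set2_ne v (Or.inl h)]

theorem pv_idx_eq_col {ans : List (List Int)} {n i j : Nat} {v : Int} {j' : Nat} (h : j' ≠ j) :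
    (List.range n).filter (fun i' => pvGet2 (pvSet2 ans i j v) i' j' = 0)
      = (List.range n).filter (fun i' => pvGet2 ans i' j' = 0) := by
  apply List.filter_congr
  intro k _
  simp [pv_get2_set2_ne v (Or.inr h)]

def pvCntRow (ans : List (List Int)) (m i : Nat) : Nat :=
  ((List.range m).filter (fun j => pvGet2 ans i j = 0)).length

def pvCnt (ans : List (List Int)) (n m : Nat) : Nat :=
  ((List.range n).map (fun i => pvCntRow ans m i)).sum

theorem pv_sum_dec {f g : Nat → Nat} : ∀ (n i : Nat), i < n → (∀ k, k ≠ i → g k = f k) →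
    g i + 1 = f i → ((List.range n).map g).sum + 1 = ((List.range n).map f).sum := by
  intro n
  induction n with
  | zero => omega
  | succ n ih =>
    intro i hi hne hgi
    rw [List.range_succ, List.map_append, List.map_append, List.sum_append, List.sum_append]
    by_cases h : i = n
    · subst h
      have : ∀ k ∈ List.range i, g k = f k := fun k hk =>
        hne k (by simp at hk; omega)
      rw [List.map_congr_left this]
      simp only [List.map_cons, List.map_nil, List.sum_cons, List.sum_nil]
      omega
    · have := ih i (by omega) hne hgi
      simp only [List.map_cons, List.map_nil, List.sum_cons, List.sum_nil]
      rw [hne n (by omega)]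
      omega

-- the loop invariant tying A's state to the grid it describes

def PvInv (matrix : List (List Int)) (n m : Nat) (s : PvStA) : Prop :=
  s.ans.length = n ∧ (∀ r ∈ s.ans, r.length = m) ∧
  s.rowVals.length = n ∧ s.colVals.length = m ∧
  (∀ i, i < n → (s.rowVals.getD i []).Pairwise (fun a b => b ≤ a) ∧
      (s.rowVals.getD i []).Perm (pvUnRow matrix s.ans m i)) ∧
  (∀ j, j < m → (s.colVals.getD j []).Pairwise (fun a b => b ≤ a) ∧
      (s.colVals.getD j []).Perm (pvUnCol matrix s.ans n j)) ∧
  s.finish + pvCnt s.ans n m = n * m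

theorem pv_getD_set_self {l : List (List Int)} {i : Nat} (x : List Int) (h : i < l.length) :
    (l.set i x).getD i [] = x := by
  rw [List.getD_eq_getElem?_getD, List.getElem?_set_self (by simpa using h)]; rfl

theorem pv_getD_set_ne {l : List (List Int)} {i i' : Nat} (x : List Int) (h : i' ≠ i) :
    (l.set i x).getD i' [] = l.getD i' [] := by
  rw [List.getD_eq_getElem?_getD, List.getElem?_set_ne (by omega), ← List.getD_eq_getElem?_getD]

-- one fill keeps the invariant

theorem pv_fill {matrix : List (List Int)} {n m : Nat} {s : PvStA} {i j : Nat} {rank : Int}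
    (hInv : PvInv matrix n m s) (hi : i < n) (hj : j < m)
    (h0 : pvGet2 s.ans i j = 0)
    (hr : PySem.List.min? (pvUnRow matrix s.ans m i) (fun x => x) = some (pvGet2 matrix i j))
    (hc : PySem.List.min? (pvUnCol matrix s.ans n j) (fun x => x) = some (pvGet2 matrix i j))
    (hrank : rank ≠ 0) :
    PvInv matrix n m (pvFillA rank i j s) := by
  obtain ⟨hlen, hrow, hrv, hcv, hrowinv, hcolinv, hcnt⟩ := hInv
  have hiL : i < s.ans.length := by omega
  have hrowmem : s.ans.getD i [] ∈ s.ans := by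
    rw [List.getD_eq_getElem (l := s.ans) (hn := hiL)]; exact List.getElem_mem hiL
  have hjr : j < (s.ans.getD i []).length := by rw [hrow _ hrowmem]; exact hj
  have hidxrow := pv_idx_perm_row (v := rank) hj h0 hrank hiL hjr
  have hidxcol := pv_idx_perm_col (v := rank) hi h0 hrank hiL hjr
  have hunrow : (pvUnRow matrix s.ans m i).Perm
      (pvGet2 matrix i j :: pvUnRow matrix (pvSet2 s.ans i j rank) m i) := by
    simpa [pvUnRow] using hidxrow.map (fun j' => pvGet2 matrix i j')
  have huncol : (pvUnCol matrix s.ans n j).Perm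
      (pvGet2 matrix i j :: pvUnCol matrix (pvSet2 s.ans i j rank) n j) := by
    simpa [pvUnCol] using hidxcol.map (fun i' => pvGet2 matrix i' j)
  refine ⟨by simpa [pvFillA, pv_length_set2] using hlen,
    pv_rowlen_set2 i j rank hrow,
    by simpa [pvFillA] using hrv,
    by simpa [pvFillA] using hcv, ?_, ?_, ?_⟩
  · -- row lists
    intro i' hi'
    by_cases hii : i' = i
    · subst hii
      obtain ⟨hp, hperm⟩ := hrowinv i' hi'
      have hlast : (s.rowVals.getD i' []).getLast? = some (pvGet2 matrix i' j) := by
        rw [pv_getLast_eq_min hp hperm]; exact hr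
      have hne : s.rowVals.getD i' [] ≠ [] := by
        intro hnil; rw [hnil] at hlast; cases hlast
      have hsplit : (s.rowVals.getD i' []).dropLast ++ [pvGet2 matrix i' j]
          = s.rowVals.getD i' [] := by
        have hcat := List.dropLast_concat_getLast hne
        have h2 := List.getLast?_eq_some_getLast (l := s.rowVals.getD i' []) hne
        rw [h2] at hlast
        rwa [Option.some_inj.mp hlast] at hcat
      have hgds : (s.rowVals.set i' ((s.rowVals.getD i' []).dropLast)).getD i' []
          = (s.rowVals.getD i' []).dropLast := pv_getD_set_self _ (by omega)
      constructor
      · simp only [pvFillA]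
        rw [hgds]
        exact hp.sublist (List.dropLast_sublist _)
      · simp only [pvFillA]
        rw [hgds]
        have ha := (List.perm_append_singleton (pvGet2 matrix i' j)
          ((s.rowVals.getD i' []).dropLast)).symm
        rw [hsplit] at ha
        exact ((ha.trans hperm).trans hunrow).cons_inv
    · obtain ⟨hp, hperm⟩ := hrowinv i' hi'
      have hgd : (pvFillA rank i j s).rowVals.getD i' [] = s.rowVals.getD i' [] := by
        simp only [pvFillA]; exact pv_getD_set_ne _ hii
      have hur : pvUnRow matrix (pvSet2 s.ans i j rank) m i' = pvUnRow matrix s.ans m i' := by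
        unfold pvUnRow; rw [pv_idx_eq_row hii]
      rw [hgd]
      exact ⟨hp, by rw [show (pvFillA rank i j s).ans = pvSet2 s.ans i j rank from rfl, hur]; exact hperm⟩
  · -- column lists
    intro j' hj'
    by_cases hjj : j' = j
    · subst hjj
      obtain ⟨hp, hperm⟩ := hcolinv j' hj'
      have hlast : (s.colVals.getD j' []).getLast? = some (pvGet2 matrix i j') := by
        rw [pv_getLast_eq_min hp hperm]; exact hc
      have hne : s.colVals.getD j' [] ≠ [] := by
        intro hnil; rw [hnil] at hlast; cases hlast
      have hsplit : (s.colVals.getD j' []).dropLast ++ [pvGet2 matrix i j']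
          = s.colVals.getD j' [] := by
        have hcat := List.dropLast_concat_getLast hne
        have h2 := List.getLast?_eq_some_getLast (l := s.colVals.getD j' []) hne
        rw [h2] at hlast
        rwa [Option.some_inj.mp hlast] at hcat
      have hgds : (s.colVals.set j' ((s.colVals.getD j' []).dropLast)).getD j' []
          = (s.colVals.getD j' []).dropLast := pv_getD_set_self _ (by omega)
      constructor
      · simp only [pvFillA]
        rw [hgds]
        exact hp.sublist (List.dropLast_sublist _)
      · simp only [pvFillA]
        rw [hgds]
        have ha := (List.perm_append_singleton (pvGet2 matrix i j')
          ((s.colVals.getD j' []).dropLast)).symm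
        rw [hsplit] at ha
        exact ((ha.trans hperm).trans huncol).cons_inv
    · obtain ⟨hp, hperm⟩ := hcolinv j' hj'
      have hgd : (pvFillA rank i j s).colVals.getD j' [] = s.colVals.getD j' [] := by
        simp only [pvFillA]; exact pv_getD_set_ne _ hjj
      have huc : pvUnCol matrix (pvSet2 s.ans i j rank) n j' = pvUnCol matrix s.ans n j' := by
        unfold pvUnCol; rw [pv_idx_eq_col hjj]
      rw [hgd]
      exact ⟨hp, by rw [show (pvFillA rank i j s).ans = pvSet2 s.ans i j rank from rfl, huc]; exact hperm⟩
  · -- the count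
    have hdec : pvCnt (pvSet2 s.ans i j rank) n m + 1 = pvCnt s.ans n m := by
      apply pv_sum_dec n i hi
      · intro k hk
        unfold pvCntRow
        rw [pv_idx_eq_row hk]
      · unfold pvCntRow
        rw [hidxrow.length_eq]
        simp
    show s.finish + 1 + pvCnt (pvSet2 s.ans i j rank) n m = n * m
    omega

-- cells unranked now were unranked at the round start, so the snapshot minimum is still the minimum

theorem pv_min_mono_row {matrix a0 a : List (List Int)} {m i j : Nat}
    (hmono : ∀ i' j', pvGet2 a i' j' = 0 → pvGet2 a0 i' j' = 0)
    (hj : j < m) (h0 : pvGet2 a i j = 0)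
    (hs : PySem.List.min? (pvUnRow matrix a0 m i) (fun x => x) = some (pvGet2 matrix i j)) :
    PySem.List.min? (pvUnRow matrix a m i) (fun x => x) = some (pvGet2 matrix i j) := by
  apply pv_min_some
  · unfold pvUnRow
    refine List.mem_map.mpr ⟨j, ?_, rfl⟩
    simp [List.mem_filter, List.mem_range, hj, h0]
  · intro x hx
    apply PySem.List.min?_isMin hs
    unfold pvUnRow at hx ⊢
    obtain ⟨j', hj', rfl⟩ := List.mem_map.mp hx
    refine List.mem_map.mpr ⟨j', ?_, rfl⟩
    simp only [List.mem_filter, List.mem_range] at hj' ⊢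
    exact ⟨hj'.1, by simpa using hmono i j' (by simpa using hj'.2)⟩

theorem pv_min_mono_col {matrix a0 a : List (List Int)} {n i j : Nat}
    (hmono : ∀ i' j', pvGet2 a i' j' = 0 → pvGet2 a0 i' j' = 0)
    (hi : i < n) (h0 : pvGet2 a i j = 0)
    (hs : PySem.List.min? (pvUnCol matrix a0 n j) (fun x => x) = some (pvGet2 matrix i j)) :
    PySem.List.min? (pvUnCol matrix a n j) (fun x => x) = some (pvGet2 matrix i j) := by
  apply pv_min_some
  · unfold pvUnCol
    refine List.mem_map.mpr ⟨i, ?_, rfl⟩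
    simp [List.mem_filter, List.mem_range, hi, h0]
  · intro x hx
    apply PySem.List.min?_isMin hs
    unfold pvUnCol at hx ⊢
    obtain ⟨i', hi', rfl⟩ := List.mem_map.mp hx
    refine List.mem_map.mpr ⟨i', ?_, rfl⟩
    simp only [List.mem_filter, List.mem_range] at hi' ⊢
    exact ⟨hi'.1, by simpa using hmono i' j (by simpa using hi'.2)⟩

-- filling all listed cells of one row keeps the invariant; ans evolves by plain pvSet2 folds

theorem pv_fillfold_row {matrix : List (List Int)} {n m : Nat} {rank : Int} {i : Nat}
    {s0ans : List (List Int)} (hrank : rank ≠ 0) (hi : i < n) :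
    ∀ (ps : List Nat) (s : PvStA),
    PvInv matrix n m s →
    (∀ i' j', pvGet2 s.ans i' j' = 0 → pvGet2 s0ans i' j' = 0) →
    ps.Nodup →
    (∀ j ∈ ps, j < m ∧ pvGet2 s.ans i j = 0
      ∧ PySem.List.min? (pvUnRow matrix s0ans m i) (fun x => x) = some (pvGet2 matrix i j)
      ∧ PySem.List.min? (pvUnCol matrix s0ans n j) (fun x => x) = some (pvGet2 matrix i j)) →
    PvInv matrix n m (ps.foldl (fun s j => pvFillA rank i j s) s)
    ∧ (ps.foldl (fun s j => pvFillA rank i j s) s).ans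
        = ps.foldl (fun a j => pvSet2 a i j rank) s.ans
    ∧ (∀ i' j', pvGet2 (ps.foldl (fun s j => pvFillA rank i j s) s).ans i' j' = 0 →
        pvGet2 s0ans i' j' = 0) := by
  intro ps
  induction ps with
  | nil => intro s hInv hmono _ _; exact ⟨hInv, rfl, hmono⟩
  | cons j ps ih =>
    intro s hInv hmono hnd hconds
    obtain ⟨hj, h0, hr0, hc0⟩ := hconds j (by simp)
    have hr := pv_min_mono_row hmono hj h0 hr0
    have hc := pv_min_mono_col hmono hi h0 hc0
    have hInv' := pv_fill hInv hi hj h0 hr hc hrank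
    have hbound1 : i < s.ans.length := by
      obtain ⟨hlen, _, _, _, _, _, _⟩ := hInv; omega
    have hbound2 : j < (s.ans.getD i []).length := by
      obtain ⟨hlen, hrow, _, _, _, _, _⟩ := hInv
      have : s.ans.getD i [] ∈ s.ans := by
        rw [List.getD_eq_getElem (l := s.ans) (hn := hbound1)]; exact List.getElem_mem hbound1
      rw [hrow _ this]; exact hj
    have hmono' : ∀ i' j', pvGet2 (pvFillA rank i j s).ans i' j' = 0 → pvGet2 s0ans i' j' = 0 := by
      intro i' j' h
      by_cases hij : i' = i ∧ j' = j
      · obtain ⟨rfl, rfl⟩ := hij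
        rw [show (pvFillA rank i' j' s).ans = pvSet2 s.ans i' j' rank from rfl,
          pv_get2_set2_self rank hbound1 hbound2] at h
        exact absurd h hrank
      · rw [show (pvFillA rank i j s).ans = pvSet2 s.ans i j rank from rfl,
          pv_get2_set2_ne rank (by tauto)] at h
        exact hmono i' j' h
    have hconds' : ∀ j' ∈ ps, j' < m ∧ pvGet2 (pvFillA rank i j s).ans i j' = 0
        ∧ PySem.List.min? (pvUnRow matrix s0ans m i) (fun x => x) = some (pvGet2 matrix i j')
        ∧ PySem.List.min? (pvUnCol matrix s0ans n j') (fun x => x) = some (pvGet2 matrix i j') := by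
      intro j' hj'
      obtain ⟨h1, h2, h3, h4⟩ := hconds j' (by simp [hj'])
      have hne : j' ≠ j := by
        intro h; subst h; exact (List.nodup_cons.mp hnd).1 hj'
      refine ⟨h1, ?_, h3, h4⟩
      rw [show (pvFillA rank i j s).ans = pvSet2 s.ans i j rank from rfl,
        pv_get2_set2_ne rank (Or.inr hne)]
      exact h2
    obtain ⟨r1, r2, r3⟩ := ih (pvFillA rank i j s) hInv' hmono' (List.nodup_cons.mp hnd).2 hconds'
    refine ⟨by simpa using r1, ?_, by simpa using r3⟩
    simp only [List.foldl_cons]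
    rw [r2]
    rfl

theorem pv_fillfold_col {matrix : List (List Int)} {n m : Nat} {rank : Int} {j : Nat}
    {s0ans : List (List Int)} (hrank : rank ≠ 0) (hj : j < m) :
    ∀ (ps : List Nat) (s : PvStA),
    PvInv matrix n m s →
    (∀ i' j', pvGet2 s.ans i' j' = 0 → pvGet2 s0ans i' j' = 0) →
    ps.Nodup →
    (∀ i ∈ ps, i < n ∧ pvGet2 s.ans i j = 0
      ∧ PySem.List.min? (pvUnRow matrix s0ans m i) (fun x => x) = some (pvGet2 matrix i j)
      ∧ PySem.List.min? (pvUnCol matrix s0ans n j) (fun x => x) = some (pvGet2 matrix i j)) →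
    PvInv matrix n m (ps.foldl (fun s i => pvFillA rank i j s) s)
    ∧ (ps.foldl (fun s i => pvFillA rank i j s) s).ans
        = ps.foldl (fun a i => pvSet2 a i j rank) s.ans
    ∧ (∀ i' j', pvGet2 (ps.foldl (fun s i => pvFillA rank i j s) s).ans i' j' = 0 →
        pvGet2 s0ans i' j' = 0) := by
  intro ps
  induction ps with
  | nil => intro s hInv hmono _ _; exact ⟨hInv, rfl, hmono⟩
  | cons i ps ih =>
    intro s hInv hmono hnd hconds
    obtain ⟨hi, h0, hr0, hc0⟩ := hconds i (by simp)
    have hr := pv_min_mono_row hmono hj h0 hr0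
    have hc := pv_min_mono_col hmono hi h0 hc0
    have hInv' := pv_fill hInv hi hj h0 hr hc hrank
    have hbound1 : i < s.ans.length := by
      obtain ⟨hlen, _, _, _, _, _, _⟩ := hInv; omega
    have hbound2 : j < (s.ans.getD i []).length := by
      obtain ⟨hlen, hrow, _, _, _, _, _⟩ := hInv
      have : s.ans.getD i [] ∈ s.ans := by
        rw [List.getD_eq_getElem (l := s.ans) (hn := hbound1)]; exact List.getElem_mem hbound1
      rw [hrow _ this]; exact hj
    have hmono' : ∀ i' j', pvGet2 (pvFillA rank i j s).ans i' j' = 0 → pvGet2 s0ans i' j' = 0 := by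
      intro i' j' h
      by_cases hij : i' = i ∧ j' = j
      · obtain ⟨rfl, rfl⟩ := hij
        rw [show (pvFillA rank i' j' s).ans = pvSet2 s.ans i' j' rank from rfl,
          pv_get2_set2_self rank hbound1 hbound2] at h
        exact absurd h hrank
      · rw [show (pvFillA rank i j s).ans = pvSet2 s.ans i j rank from rfl,
          pv_get2_set2_ne rank (by tauto)] at h
        exact hmono i' j' h
    have hconds' : ∀ i' ∈ ps, i' < n ∧ pvGet2 (pvFillA rank i j s).ans i' j = 0
        ∧ PySem.List.min? (pvUnRow matrix s0ans m i') (fun x => x) = some (pvGet2 matrix i' j)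
        ∧ PySem.List.min? (pvUnCol matrix s0ans n j) (fun x => x) = some (pvGet2 matrix i' j) := by
      intro i' hi'
      obtain ⟨h1, h2, h3, h4⟩ := hconds i' (by simp [hi'])
      have hne : i' ≠ i := by
        intro h; subst h; exact (List.nodup_cons.mp hnd).1 hi'
      refine ⟨h1, ?_, h3, h4⟩
      rw [show (pvFillA rank i j s).ans = pvSet2 s.ans i j rank from rfl,
        pv_get2_set2_ne rank (Or.inl hne)]
      exact h2
    obtain ⟨r1, r2, r3⟩ := ih (pvFillA rank i j s) hInv' hmono' (List.nodup_cons.mp hnd).2 hconds'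
    refine ⟨by simpa using r1, ?_, by simpa using r3⟩
    simp only [List.foldl_cons]
    rw [r2]
    rfl

-- A's right-flag/position scan computed in closed form

theorem pv_scan_row (a matrix : List (List Int)) (rowRank colRank : List (Option Int)) (i : Nat) :
    ∀ (js : List Nat) (r : Bool) (p : List Nat),
    js.foldl (fun (rp : Bool × List Nat) j =>
        if pvGet2 a i j = 0 then
          if some (pvGet2 matrix i j) = rowRank.getD i none then
            if some (pvGet2 matrix i j) = colRank.getD j none then (rp.1, rp.2 ++ [j])
            else (false, rp.2)
          else rp
        else rp) (r, p)
    = (r && js.all (fun j => !(decide (pvGet2 a i j = 0)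
          && decide (some (pvGet2 matrix i j) = rowRank.getD i none))
          || decide (some (pvGet2 matrix i j) = colRank.getD j none)),
      p ++ js.filter (fun j => decide (pvGet2 a i j = 0)
          && decide (some (pvGet2 matrix i j) = rowRank.getD i none)
          && decide (some (pvGet2 matrix i j) = colRank.getD j none))) := by
  intro js
  induction js with
  | nil => intro r p; simp
  | cons j js ih =>
    intro r p
    simp only [List.foldl_cons, List.all_cons, List.filter_cons]
    by_cases h1 : pvGet2 a i j = 0
    · by_cases h2 : some (pvGet2 matrix i j) = rowRank.getD i none
      · by_cases h3 : some (pvGet2 matrix i j) = colRank.getD j none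
        · rw [if_pos h1, if_pos h2, if_pos h3, ih]
          simp only [decide_eq_true h1, decide_eq_true h2, decide_eq_true h3]
          simp
        · rw [if_pos h1, if_pos h2, if_neg h3, ih]
          simp only [decide_eq_true h1, decide_eq_true h2, decide_eq_false h3]
          simp
      · rw [if_pos h1, if_neg h2, ih]
        simp only [decide_eq_true h1, decide_eq_false h2]
        simp
    · rw [if_neg h1, ih]
      simp only [decide_eq_false h1]
      simp

theorem pv_scan_col (a matrix : List (List Int)) (rowRank colRank : List (Option Int)) (j : Nat) :
    ∀ (is : List Nat) (r : Bool) (p : List Nat),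
    is.foldl (fun (rp : Bool × List Nat) i =>
        if pvGet2 a i j = 0 then
          if some (pvGet2 matrix i j) = colRank.getD j none then
            if some (pvGet2 matrix i j) = rowRank.getD i none then (rp.1, rp.2 ++ [i])
            else (false, rp.2)
          else rp
        else rp) (r, p)
    = (r && is.all (fun i => !(decide (pvGet2 a i j = 0)
          && decide (some (pvGet2 matrix i j) = colRank.getD j none))
          || decide (some (pvGet2 matrix i j) = rowRank.getD i none)),
      p ++ is.filter (fun i => decide (pvGet2 a i j = 0)
          && decide (some (pvGet2 matrix i j) = colRank.getD j none)
          && decide (some (pvGet2 matrix i j) = rowRank.getD i none))) := by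
  intro is
  induction is with
  | nil => intro r p; simp
  | cons i is ih =>
    intro r p
    simp only [List.foldl_cons, List.all_cons, List.filter_cons]
    by_cases h1 : pvGet2 a i j = 0
    · by_cases h2 : some (pvGet2 matrix i j) = colRank.getD j none
      · by_cases h3 : some (pvGet2 matrix i j) = rowRank.getD i none
        · rw [if_pos h1, if_pos h2, if_pos h3, ih]
          simp only [decide_eq_true h1, decide_eq_true h2, decide_eq_true h3]
          simp
        · rw [if_pos h1, if_pos h2, if_neg h3, ih]
          simp only [decide_eq_true h1, decide_eq_true h2, decide_eq_false h3]
          simp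
      · rw [if_pos h1, if_neg h2, ih]
        simp only [decide_eq_true h1, decide_eq_false h2]
        simp
    · rw [if_neg h1, ih]
      simp only [decide_eq_false h1]
      simp

theorem pv_rowpass {matrix : List (List Int)} {n m : Nat} {rank : Int}
    {rowRank colRank : List (Option Int)} {s0ans : List (List Int)} {i : Nat}
    (hrank : rank ≠ 0) (hi : i < n)
    (hRK : ∀ i' < n, rowRank.getD i' none
        = PySem.List.min? (pvUnRow matrix s0ans m i') (fun x => x))
    (hCK : ∀ j' < m, colRank.getD j' none
        = PySem.List.min? (pvUnCol matrix s0ans n j') (fun x => x))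
    {s : PvStA} (hInv : PvInv matrix n m s)
    (hmono : ∀ i' j', pvGet2 s.ans i' j' = 0 → pvGet2 s0ans i' j' = 0) :
    PvInv matrix n m (pvRowPassA matrix m rank rowRank colRank s i)
    ∧ (pvRowPassA matrix m rank rowRank colRank s i).ans
        = pvRowStepB matrix m rank rowRank colRank s.ans i
    ∧ (∀ i' j', pvGet2 (pvRowPassA matrix m rank rowRank colRank s i).ans i' j' = 0 →
        pvGet2 s0ans i' j' = 0) := by
  unfold pvRowPassA pvRowStepB
  rw [pv_scan_row]
  simp only []
  set allb := (List.range m).all (fun j => !(decide (pvGet2 s.ans i j = 0)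
      && decide (some (pvGet2 matrix i j) = rowRank.getD i none))
      || decide (some (pvGet2 matrix i j) = colRank.getD j none)) with hallb
  set pos := (List.range m).filter (fun j => decide (pvGet2 s.ans i j = 0)
      && decide (some (pvGet2 matrix i j) = rowRank.getD i none)
      && decide (some (pvGet2 matrix i j) = colRank.getD j none)) with hpos
  set cells := (List.range m).filter (fun j =>
      pvGet2 s.ans i j = 0 ∧ some (pvGet2 matrix i j) = rowRank.getD i none) with hcells
  have hBall : cells.all (fun j => some (pvGet2 matrix i j) = colRank.getD j none) = allb := by
    rw [hcells, List.all_filter, hallb]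
    apply List.all_congr rfl
    intro j
    by_cases h1 : pvGet2 s.ans i j = 0 <;>
      by_cases h2 : some (pvGet2 matrix i j) = rowRank.getD i none <;>
        simp [h1, h2]
  by_cases hall : allb = true
  · have hcp : cells = pos := by
      rw [hcells, hpos]
      apply List.filter_congr
      intro j hj
      have hone := (List.all_eq_true.mp hall) j hj
      simp only [Bool.decide_and]
      by_cases h1 : pvGet2 s.ans i j = 0
      · by_cases h2 : some (pvGet2 matrix i j) = rowRank.getD i none
        · by_cases h3 : some (pvGet2 matrix i j) = colRank.getD j none
          · simp only [decide_eq_true h1, decide_eq_true h2, decide_eq_true h3]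
            rfl
          · exfalso
            simp only [decide_eq_true h1, decide_eq_true h2, decide_eq_false h3] at hone
            simp at hone
        · simp only [decide_eq_true h1, decide_eq_false h2]
          rfl
      · simp only [decide_eq_false h1]
        rfl
    rw [if_pos (by simp [hall]), if_pos (by rw [hBall]; exact hall), hcp]
    have hconds : ∀ j ∈ pos, j < m ∧ pvGet2 s.ans i j = 0
        ∧ PySem.List.min? (pvUnRow matrix s0ans m i) (fun x => x) = some (pvGet2 matrix i j)
        ∧ PySem.List.min? (pvUnCol matrix s0ans n j) (fun x => x) = some (pvGet2 matrix i j) := by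
      intro j hj
      rw [hpos] at hj
      obtain ⟨hjr, hflt⟩ := List.mem_filter.mp hj
      have hjm : j < m := List.mem_range.mp hjr
      simp only [Bool.and_eq_true, decide_eq_true_eq] at hflt
      exact ⟨hjm, hflt.1.1, (hRK i hi).symm.trans hflt.1.2.symm,
        (hCK j hjm).symm.trans hflt.2.symm⟩
    have hnd : pos.Nodup := by
      rw [hpos]; exact List.Nodup.filter _ List.nodup_range
    exact pv_fillfold_row hrank hi pos s hInv hmono hnd hconds
  · rw [if_neg (by simp [hall]), if_neg (by rw [hBall]; exact hall)]
    exact ⟨hInv, rfl, hmono⟩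

theorem pv_colpass {matrix : List (List Int)} {n m : Nat} {rank : Int}
    {rowRank colRank : List (Option Int)} {s0ans : List (List Int)} {j : Nat}
    (hrank : rank ≠ 0) (hj : j < m)
    (hRK : ∀ i' < n, rowRank.getD i' none
        = PySem.List.min? (pvUnRow matrix s0ans m i') (fun x => x))
    (hCK : ∀ j' < m, colRank.getD j' none
        = PySem.List.min? (pvUnCol matrix s0ans n j') (fun x => x))
    {s : PvStA} (hInv : PvInv matrix n m s)
    (hmono : ∀ i' j', pvGet2 s.ans i' j' = 0 → pvGet2 s0ans i' j' = 0) :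
    PvInv matrix n m (pvColPassA matrix n rank rowRank colRank s j)
    ∧ (pvColPassA matrix n rank rowRank colRank s j).ans
        = pvColStepB matrix n rank rowRank colRank s.ans j
    ∧ (∀ i' j', pvGet2 (pvColPassA matrix n rank rowRank colRank s j).ans i' j' = 0 →
        pvGet2 s0ans i' j' = 0) := by
  unfold pvColPassA pvColStepB
  rw [pv_scan_col]
  simp only []
  set allb := (List.range n).all (fun i => !(decide (pvGet2 s.ans i j = 0)
      && decide (some (pvGet2 matrix i j) = colRank.getD j none))
      || decide (some (pvGet2 matrix i j) = rowRank.getD i none)) with hallb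
  set pos := (List.range n).filter (fun i => decide (pvGet2 s.ans i j = 0)
      && decide (some (pvGet2 matrix i j) = colRank.getD j none)
      && decide (some (pvGet2 matrix i j) = rowRank.getD i none)) with hpos
  set cells := (List.range n).filter (fun i =>
      pvGet2 s.ans i j = 0 ∧ some (pvGet2 matrix i j) = colRank.getD j none) with hcells
  have hBall : cells.all (fun i => some (pvGet2 matrix i j) = rowRank.getD i none) = allb := by
    rw [hcells, List.all_filter, hallb]
    apply List.all_congr rfl
    intro i
    by_cases h1 : pvGet2 s.ans i j = 0 <;>
      by_cases h2 : some (pvGet2 matrix i j) = colRank.getD j none <;>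
        simp [h1, h2]
  by_cases hall : allb = true
  · have hcp : cells = pos := by
      rw [hcells, hpos]
      apply List.filter_congr
      intro i hi
      have hone := (List.all_eq_true.mp hall) i hi
      simp only [Bool.decide_and]
      by_cases h1 : pvGet2 s.ans i j = 0
      · by_cases h2 : some (pvGet2 matrix i j) = colRank.getD j none
        · by_cases h3 : some (pvGet2 matrix i j) = rowRank.getD i none
          · simp only [decide_eq_true h1, decide_eq_true h2, decide_eq_true h3]
            rfl
          · exfalso
            simp only [decide_eq_true h1, decide_eq_true h2, decide_eq_false h3] at hone
            simp at hone
        · simp only [decide_eq_true h1, decide_eq_false h2]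
          rfl
      · simp only [decide_eq_false h1]
        rfl
    rw [if_pos (by simp [hall]), if_pos (by rw [hBall]; exact hall), hcp]
    have hconds : ∀ i ∈ pos, i < n ∧ pvGet2 s.ans i j = 0
        ∧ PySem.List.min? (pvUnRow matrix s0ans m i) (fun x => x) = some (pvGet2 matrix i j)
        ∧ PySem.List.min? (pvUnCol matrix s0ans n j) (fun x => x) = some (pvGet2 matrix i j) := by
      intro i hi
      rw [hpos] at hi
      obtain ⟨hir, hflt⟩ := List.mem_filter.mp hi
      have hin : i < n := List.mem_range.mp hir
      simp only [Bool.and_eq_true, decide_eq_true_eq] at hflt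
      exact ⟨hin, hflt.1.1, (hRK i hin).symm.trans hflt.2.symm,
        (hCK j hj).symm.trans hflt.1.2.symm⟩
    have hnd : pos.Nodup := by
      rw [hpos]; exact List.Nodup.filter _ List.nodup_range
    exact pv_fillfold_col hrank hj pos s hInv hmono hnd hconds
  · rw [if_neg (by simp [hall]), if_neg (by rw [hBall]; exact hall)]
    exact ⟨hInv, rfl, hmono⟩

theorem pv_passfold_row {matrix : List (List Int)} {n m : Nat} {rank : Int}
    {rowRank colRank : List (Option Int)} {s0ans : List (List Int)}
    (hrank : rank ≠ 0)
    (hRK : ∀ i' < n, rowRank.getD i' none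
        = PySem.List.min? (pvUnRow matrix s0ans m i') (fun x => x))
    (hCK : ∀ j' < m, colRank.getD j' none
        = PySem.List.min? (pvUnCol matrix s0ans n j') (fun x => x)) :
    ∀ (rs : List Nat) (s : PvStA),
    (∀ i ∈ rs, i < n) → PvInv matrix n m s →
    (∀ i' j', pvGet2 s.ans i' j' = 0 → pvGet2 s0ans i' j' = 0) →
    PvInv matrix n m (rs.foldl (pvRowPassA matrix m rank rowRank colRank) s)
    ∧ (rs.foldl (pvRowPassA matrix m rank rowRank colRank) s).ans
        = rs.foldl (pvRowStepB matrix m rank rowRank colRank) s.ans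
    ∧ (∀ i' j', pvGet2 (rs.foldl (pvRowPassA matrix m rank rowRank colRank) s).ans i' j' = 0 →
        pvGet2 s0ans i' j' = 0) := by
  intro rs
  induction rs with
  | nil => intro s _ hInv hmono; exact ⟨hInv, rfl, hmono⟩
  | cons i rs ih =>
    intro s hbnd hInv hmono
    obtain ⟨p1, p2, p3⟩ := pv_rowpass hrank (hbnd i (by simp)) hRK hCK hInv hmono
    obtain ⟨q1, q2, q3⟩ := ih (pvRowPassA matrix m rank rowRank colRank s i)
      (fun i' hi' => hbnd i' (by simp [hi'])) p1 p3
    refine ⟨q1, ?_, q3⟩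
    simp only [List.foldl_cons]
    rw [q2, p2]

theorem pv_passfold_col {matrix : List (List Int)} {n m : Nat} {rank : Int}
    {rowRank colRank : List (Option Int)} {s0ans : List (List Int)}
    (hrank : rank ≠ 0)
    (hRK : ∀ i' < n, rowRank.getD i' none
        = PySem.List.min? (pvUnRow matrix s0ans m i') (fun x => x))
    (hCK : ∀ j' < m, colRank.getD j' none
        = PySem.List.min? (pvUnCol matrix s0ans n j') (fun x => x)) :
    ∀ (cs : List Nat) (s : PvStA),
    (∀ j ∈ cs, j < m) → PvInv matrix n m s →
    (∀ i' j', pvGet2 s.ans i' j' = 0 → pvGet2 s0ans i' j' = 0) →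
    PvInv matrix n m (cs.foldl (pvColPassA matrix n rank rowRank colRank) s)
    ∧ (cs.foldl (pvColPassA matrix n rank rowRank colRank) s).ans
        = cs.foldl (pvColStepB matrix n rank rowRank colRank) s.ans
    ∧ (∀ i' j', pvGet2 (cs.foldl (pvColPassA matrix n rank rowRank colRank) s).ans i' j' = 0 →
        pvGet2 s0ans i' j' = 0) := by
  intro cs
  induction cs with
  | nil => intro s _ hInv hmono; exact ⟨hInv, rfl, hmono⟩
  | cons j cs ih =>
    intro s hbnd hInv hmono
    obtain ⟨p1, p2, p3⟩ := pv_colpass hrank (hbnd j (by simp)) hRK hCK hInv hmono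
    obtain ⟨q1, q2, q3⟩ := ih (pvColPassA matrix n rank rowRank colRank s j)
      (fun j' hj' => hbnd j' (by simp [hj'])) p1 p3
    refine ⟨q1, ?_, q3⟩
    simp only [List.foldl_cons]
    rw [q2, p2]

-- 'finish < total' is B's 'some cell is still 0'

theorem pv_any_iff {ans : List (List Int)} {n m : Nat} :
    ((List.range n).any (fun i => (List.range m).any (fun j => pvGet2 ans i j = 0)))
      = decide (0 < pvCnt ans n m) := by
  by_cases h : 0 < pvCnt ans n m
  · rw [decide_eq_true h]
    obtain ⟨x, hx, hxpos⟩ : ∃ x ∈ (List.range n).map (fun i => pvCntRow ans m i), 0 < x := by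
      by_contra hc
      push Not at hc
      have : pvCnt ans n m = 0 := List.sum_eq_zero_iff.mpr (fun x hx => by
        have := hc x hx; omega)
      omega
    obtain ⟨i, hi, rfl⟩ := List.mem_map.mp hx
    have : ∃ j ∈ List.range m, pvGet2 ans i j = 0 := by
      unfold pvCntRow at hxpos
      rcases List.length_pos_iff_exists_mem.mp hxpos with ⟨j, hj⟩
      obtain ⟨hjr, hjf⟩ := List.mem_filter.mp hj
      exact ⟨j, hjr, by simpa using hjf⟩
    obtain ⟨j, hjr, hj0⟩ := this
    apply List.any_eq_true.mpr
    exact ⟨i, hi, List.any_eq_true.mpr ⟨j, hjr, by simpa using hj0⟩⟩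
  · rw [decide_eq_false h]
    apply Bool.eq_false_iff.mpr
    intro hany
    obtain ⟨i, hi, hinner⟩ := List.any_eq_true.mp hany
    obtain ⟨j, hj, hj0⟩ := List.any_eq_true.mp hinner
    apply h
    have hmem : pvCntRow ans m i ∈ (List.range n).map (fun i => pvCntRow ans m i) :=
      List.mem_map.mpr ⟨i, hi, rfl⟩
    have hpos : 0 < pvCntRow ans m i := by
      unfold pvCntRow
      apply List.length_pos_iff_exists_mem.mpr
      exact ⟨j, List.mem_filter.mpr ⟨hj, by simpa using hj0⟩⟩
    calc 0 < pvCntRow ans m i := hpos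
      _ ≤ pvCnt ans n m := List.le_sum_of_mem hmem

theorem pv_loop {matrix : List (List Int)} {n m : Nat} :
    ∀ (fuel : Nat) (s : PvStA) (rank : Int),
    PvInv matrix n m s → 1 ≤ rank →
    pvLoopA matrix n m (n * m) fuel s rank = pvLoopB matrix n m fuel s.ans rank := by
  intro fuel
  induction fuel with
  | zero => intro s rank _ _; rfl
  | succ f ih =>
    intro s rank hInv hrank
    have hfin : s.finish + pvCnt s.ans n m = n * m := hInv.2.2.2.2.2.2
    simp only [pvLoopA, pvLoopB]
    by_cases hlt : s.finish < n * m
    · have hcnt : 0 < pvCnt s.ans n m := by omega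
      rw [if_pos hlt, if_pos (by rw [pv_any_iff]; exact decide_eq_true hcnt)]
      have hRKeq : (List.range n).map (fun i => (s.rowVals.getD i []).getLast?)
          = (List.range n).map
              (fun i => PySem.List.min? (pvUnRow matrix s.ans m i) (fun x => x)) := by
        apply List.map_eq_map_iff.mpr
        intro i hi
        obtain ⟨hp, hperm⟩ := hInv.2.2.2.2.1 i (List.mem_range.mp hi)
        exact pv_getLast_eq_min hp hperm
      have hCKeq : (List.range m).map (fun j => (s.colVals.getD j []).getLast?)
          = (List.range m).map
              (fun j => PySem.List.min? (pvUnCol matrix s.ans n j) (fun x => x)) := by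
        apply List.map_eq_map_iff.mpr
        intro j hj
        obtain ⟨hp, hperm⟩ := hInv.2.2.2.2.2.1 j (List.mem_range.mp hj)
        exact pv_getLast_eq_min hp hperm
      rw [hRKeq, hCKeq]
      have hRK : ∀ i' < n, ((List.range n).map
          (fun i => PySem.List.min? (pvUnRow matrix s.ans m i) (fun x => x))).getD i' none
          = PySem.List.min? (pvUnRow matrix s.ans m i') (fun x => x) :=
        fun i' hi' => PySem.List.getD_map_range _ n i' none hi'
      have hCK : ∀ j' < m, ((List.range m).map
          (fun j => PySem.List.min? (pvUnCol matrix s.ans n j) (fun x => x))).getD j' none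
          = PySem.List.min? (pvUnCol matrix s.ans n j') (fun x => x) :=
        fun j' hj' => PySem.List.getD_map_range _ m j' none hj'
      have hrk0 : rank ≠ 0 := by omega
      obtain ⟨r1, r2, r3⟩ := pv_passfold_row hrk0 hRK hCK (List.range n) s
        (fun i hi => List.mem_range.mp hi) hInv (fun _ _ h => h)
      obtain ⟨c1, c2, c3⟩ := pv_passfold_col hrk0 hRK hCK (List.range m) _
        (fun j hj => List.mem_range.mp hj) r1 r3
      rw [ih _ (rank + 1) c1 (by omega), c2, r2]
    · have hc0 : pvCnt s.ans n m = 0 := by omega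
      have hfalse : ¬ ((List.range n).any
          (fun i => (List.range m).any (fun j => pvGet2 s.ans i j = 0)) = true) := by
        rw [pv_any_iff]
        simp [hc0]
      rw [if_neg hlt, if_neg hfalse]

theorem pv_get2_replicate (n m i j : Nat) :
    pvGet2 (List.replicate n (List.replicate m (0 : Int))) i j = 0 := by
  unfold pvGet2
  simp only [List.getD_eq_getElem?_getD, List.getElem?_replicate]
  split_ifs <;> simp

theorem pv_getD_range_self : ∀ (l : List Int), (List.range l.length).map (fun j => l.getD j 0) = l := by
  intro l
  apply List.ext_getElem
  · simp
  · intro k h1 h2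
    simp only [List.getElem_map, List.getElem_range]
    rw [List.getD_eq_getElem (hn := h2)]

-- the invariant holds at the start

theorem pv_init {matrix : List (List Int)}
    (hrect : ∀ row ∈ matrix, row.length = (matrix.headD []).length) :
    PvInv matrix matrix.length (matrix.headD []).length
      ⟨List.replicate matrix.length (List.replicate (matrix.headD []).length 0),
        matrix.map (fun row => PySem.List.sorted row (fun x => x) true),
        (List.range (matrix.headD []).length).map (fun j =>
          PySem.List.sorted ((List.range matrix.length).map (fun i => pvGet2 matrix i j))
            (fun x => x) true),
        0⟩ := by
  set n := matrix.length with hn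
  set m := (matrix.headD []).length with hm
  have hfilt : ∀ (a : List (List Int)) (k i : Nat), (∀ i j, pvGet2 a i j = 0) →
      (List.range k).filter (fun j => pvGet2 a i j = 0) = List.range k := by
    intro a k i h
    apply List.filter_eq_self.mpr
    intro j _
    simp [h i j]
  refine ⟨hn.symm ▸ List.length_replicate, ?_, by simpa using hn.symm, by simp, ?_, ?_, ?_⟩
  · intro r hr
    simp only [List.mem_replicate] at hr
    simp [hr.2]
  · intro i hi
    have hget : (matrix.map (fun row => PySem.List.sorted row (fun x => x) true)).getD i []
        = PySem.List.sorted (matrix.getD i []) (fun x => x) true := by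
      rw [List.getD_eq_getElem (hn := by simpa using hi), List.getElem_map,
        List.getD_eq_getElem (hn := by simpa using hi)]
    have hrowm : matrix.getD i [] ∈ matrix := by
      rw [List.getD_eq_getElem (hn := by simpa using hi)]
      exact List.getElem_mem (by simpa using hi)
    have hrowlen : (matrix.getD i []).length = m := hrect _ hrowm
    have hun : pvUnRow matrix (List.replicate n (List.replicate m 0)) m i = matrix.getD i [] := by
      unfold pvUnRow
      rw [hfilt _ m i (fun i j => pv_get2_replicate n m i j)]
      calc (List.range m).map (fun j => pvGet2 matrix i j)
          = (List.range (matrix.getD i []).length).map (fun j => (matrix.getD i []).getD j 0) := by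
            rw [hrowlen]; rfl
        _ = matrix.getD i [] := pv_getD_range_self _
    rw [hget, hun]
    exact ⟨PySem.List.sorted_pairwise_rev _ _, PySem.List.sorted_perm _ _ _⟩
  · intro j hj
    have hget : ((List.range m).map (fun j =>
        PySem.List.sorted ((List.range n).map (fun i => pvGet2 matrix i j)) (fun x => x) true)).getD j []
        = PySem.List.sorted ((List.range n).map (fun i => pvGet2 matrix i j)) (fun x => x) true :=
      PySem.List.getD_map_range _ m j [] hj
    have hun : pvUnCol matrix (List.replicate n (List.replicate m 0)) n j
        = (List.range n).map (fun i => pvGet2 matrix i j) := by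
      unfold pvUnCol
      have : (List.range n).filter
          (fun i => pvGet2 (List.replicate n (List.replicate m 0)) i j = 0) = List.range n := by
        apply List.filter_eq_self.mpr
        intro i _
        simp [pv_get2_replicate n m i j]
      rw [this]
    rw [hget, hun]
    exact ⟨PySem.List.sorted_pairwise_rev _ _, PySem.List.sorted_perm _ _ _⟩
  · show 0 + pvCnt (List.replicate n (List.replicate m 0)) n m = n * m
    unfold pvCnt pvCntRow
    rw [List.map_congr_left (fun i _ => by
      rw [hfilt _ m i (fun i j => pv_get2_replicate n m i j), List.length_range])]
    simp [List.map_const']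

-- A = B on rectangular input
theorem pv_equal (matrix : List (List Int))
    (hrect : ∀ row ∈ matrix, row.length = (matrix.headD []).length) :
    matrixRankTransform matrix = matrixRankTransform_alt matrix := by
  have h := pv_loop (matrix := matrix) (n := matrix.length) (m := (matrix.headD []).length)
    (matrix.length * (matrix.headD []).length + 1)
    ⟨List.replicate matrix.length (List.replicate (matrix.headD []).length 0),
      matrix.map (fun row => PySem.List.sorted row (fun x => x) true),
      (List.range (matrix.headD []).length).map (fun j =>
        PySem.List.sorted ((List.range matrix.length).map (fun i => pvGet2 matrix i j))
          (fun x => x) true),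
      0⟩ 1 (pv_init hrect) (by omega)
  exact h

-- ===== VERDICT (by name: the statement is the Claim_ definition above) =====
theorem matrixRankTransform_spec : Claim_equal_matrixRankTransform := by
  intro matrix _ hpre
  unfold Spec_matrixRankTransform
  exact pv_equal matrix hpre.2
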